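-- pv_equiv track=rewrite | github.com/hopo/pythonruby_ot | Programmers/Competions_2018/Quiz/quizB-01.py | solution
-- ===== SOURCE A (Python) =====
-- def solution(no, works):
-- 	lnth = len(works)
-- 	total = sum(works) - no
--
-- 	each = total // lnth
-- 	remainder = total % lnth
--
-- 	result = 0
-- 	for i in range(remainder, lnth):
-- 		result += pow(each, 2)
--
-- 	for i in range(remainder):
-- 		result += pow(each + 1, 2)
--
-- 	return result
-- ===== SOURCE B (Python) =====
-- def solution(no, works):
--     lnth = len(works)
--     total = sum(works) - no
--     each, remainder = divmod(total, lnth)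
--     return (lnth - remainder) * each * each + remainder * (each + 1) * (each + 1)
-- ===== Notes on version B (the rewrite author's own statement) =====
-- stated objective: faster
-- what changed: Replaced the two per-element accumulation loops (adding a constant square each iteration) with the closed-form expression (lnth-remainder)*each^2 + remainder*(each+1)^2; only the sum pass remains.
import Mathlib
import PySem

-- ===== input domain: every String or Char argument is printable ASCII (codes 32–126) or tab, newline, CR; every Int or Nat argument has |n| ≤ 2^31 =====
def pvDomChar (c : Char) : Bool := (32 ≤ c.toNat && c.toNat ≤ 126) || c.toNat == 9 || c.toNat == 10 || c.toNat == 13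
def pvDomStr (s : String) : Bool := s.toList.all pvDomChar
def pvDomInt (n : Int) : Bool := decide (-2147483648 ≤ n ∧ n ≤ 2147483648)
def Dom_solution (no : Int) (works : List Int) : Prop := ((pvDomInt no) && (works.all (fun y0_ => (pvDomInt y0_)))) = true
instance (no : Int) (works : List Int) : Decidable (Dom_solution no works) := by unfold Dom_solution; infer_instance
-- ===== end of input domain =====

-- ===== PORT A =====
-- B replaces A's two constant-square accumulation loops by a closed-form expression (objective: simpler).
def solution (no : Int) (works : List Int) : Int :=
  let lnth : Int := works.length
  let total : Int := works.sum - no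
  let each : Int := PySem.Int.floordiv total lnth
  let remainder : Int := PySem.Int.mod total lnth
  let result : Int := 0
  let result := (PySem.List.pyRange remainder lnth 1).foldl (fun acc _ => acc + each ^ 2) result
  let result := (PySem.List.pyRange 0 remainder 1).foldl (fun acc _ => acc + (each + 1) ^ 2) result
  result

-- ===== PORT B =====
def solution_alt (no : Int) (works : List Int) : Int :=
  let lnth : Int := works.length
  let total : Int := works.sum - no
  let each : Int := PySem.Int.floordiv total lnth
  let remainder : Int := PySem.Int.mod total lnth
  (lnth - remainder) * each * each + remainder * (each + 1) * (each + 1)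

-- ===== PRECONDITION & SPEC =====
-- Pre_ excludes works = [], on which Python's '//' and '%' raise ZeroDivisionError.
def Pre_solution (no : Int) (works : List Int) : Prop := works ≠ []
instance (no : Int) (works : List Int) : Decidable (Pre_solution no works) := by unfold Pre_solution; infer_instance
def pvWitness_solution : Int × List Int := (3, [5, 8, 4])
def Spec_solution (no : Int) (works : List Int) (out : Int) : Prop := out = solution_alt no works
instance (no : Int) (works : List Int) (out : Int) : Decidable (Spec_solution no works out) := by unfold Spec_solution; infer_instance

-- ===== CLAIM (what is proved, stated in full; the proofs are below) =====
def Claim_equal_solution : Prop := ∀ (no : Int) (works : List Int), Dom_solution no works → Pre_solution no works → Spec_solution no works (solution no works)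

-- ===== LEMMAS AND PROOFS =====
theorem foldl_add_const (c : Int) (l : List Int) (r : Int) :
    l.foldl (fun acc _ => acc + c) r = r + l.length * c := by
  induction l generalizing r with
  | nil => simp
  | cons x xs ih => simp [List.foldl, ih]; ring

-- ===== VERDICT (by name: the statement is the Claim_ definition above) =====
theorem solution_spec : Claim_equal_solution := by
  intro no works _ hpre
  have hlen : 0 < (works.length : Int) := by
    exact_mod_cast List.length_pos_iff.mpr hpre
  unfold Spec_solution solution solution_alt
  simp only [foldl_add_const, PySem.List.length_pyRange_one]
  have hmod1 := PySem.Int.mod_nonneg (works.sum - no) hlen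
  have hmod2 := PySem.Int.mod_lt (works.sum - no) hlen
  set r := PySem.Int.mod (works.sum - no) (works.length : Int) with hr
  set e := PySem.Int.floordiv (works.sum - no) (works.length : Int) with he
  have h1 : (((works.length : Int) - r).toNat : Int) = (works.length : Int) - r := by omega
  have h2 : ((r - 0).toNat : Int) = r := by omega
  rw [h1, h2]
  ring
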